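-- pv_equiv track=rewrite | github.com/lkwhite/tRNAs-in-space | scripts/modomics/align_to_sprinzl.py | create_position_mapping
-- ===== SOURCE A (Python) =====
-- from typing import Dict, List, Optional, Tuple
--
-- def create_position_mapping(
--     aligned_modomics: str, aligned_gtRNAdb: str
-- ) -> Dict[int, int]:
--     """
--     Create mapping from Modomics positions to gtRNAdb positions.
--
--     Args:
--         aligned_modomics: Aligned Modomics sequence (with gaps)
--         aligned_gtRNAdb: Aligned gtRNAdb sequence (with gaps)
--
--     Returns:
--         Dictionary mapping 1-based Modomics position to 1-based gtRNAdb position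
--     """
--     mapping = {}
--     modomics_pos = 0
--     gtRNAdb_pos = 0
--
--     for mod_char, gtR_char in zip(aligned_modomics, aligned_gtRNAdb):
--         if mod_char != "-":
--             modomics_pos += 1
--         if gtR_char != "-":
--             gtRNAdb_pos += 1
--
--         # Only map if both positions are not gaps
--         if mod_char != "-" and gtR_char != "-":
--             mapping[modomics_pos] = gtRNAdb_pos
--
--     return mapping
-- ===== SOURCE B (Python) =====
-- from itertools import accumulate
--
--
-- def create_position_mapping(aligned_modomics, aligned_gtRNAdb):
--     pairs = list(zip(aligned_modomics, aligned_gtRNAdb))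
--     mod_counts = list(accumulate((c != "-") + 0 for c, _ in pairs))
--     gtr_counts = list(accumulate((c != "-") + 0 for _, c in pairs))
--     return {
--         mcount: gcount
--         for (m, g), (mcount, gcount) in zip(pairs, zip(mod_counts, gtr_counts))
--         if m != "-" and g != "-"
--     }
-- ===== Notes on version B (the rewrite author's own statement) =====
-- stated objective: alternative
-- what changed: Replaces the single pass with two incrementing counter variables by a table-building stage (running non-gap prefix counts over the zipped pairs via itertools.accumulate) followed by a dict comprehension over the zipped pairs and count tables.
import Mathlib
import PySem

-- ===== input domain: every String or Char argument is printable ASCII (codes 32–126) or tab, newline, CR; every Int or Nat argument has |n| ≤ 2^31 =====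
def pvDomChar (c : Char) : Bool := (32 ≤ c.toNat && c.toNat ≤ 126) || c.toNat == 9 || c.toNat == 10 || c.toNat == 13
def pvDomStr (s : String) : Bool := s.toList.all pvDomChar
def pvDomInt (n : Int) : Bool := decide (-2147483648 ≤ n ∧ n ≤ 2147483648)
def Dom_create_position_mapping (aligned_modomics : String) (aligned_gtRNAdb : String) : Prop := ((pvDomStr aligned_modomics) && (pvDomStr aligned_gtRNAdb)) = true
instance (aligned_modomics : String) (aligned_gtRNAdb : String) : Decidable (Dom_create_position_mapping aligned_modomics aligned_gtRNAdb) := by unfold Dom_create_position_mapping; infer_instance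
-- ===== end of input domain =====

-- B rebuilds the mapping from precomputed running non-gap prefix-count tables (accumulate) combined by a
-- dict comprehension, instead of A's incremental two-counter loop; objective: alternative decomposition.
-- A is total; the ports return the dict as its association list in insertion order.

-- ===== PORT A =====
-- the loop body of A: state is (mapping, modomics_pos, gtRNAdb_pos)
def pvStepA (st : PySem.Dict Int Int × Int × Int) (p : Char × Char) : PySem.Dict Int Int × Int × Int :=
  let modomics_pos := if p.1 ≠ '-' then st.2.1 + 1 else st.2.1
  let gtRNAdb_pos := if p.2 ≠ '-' then st.2.2 + 1 else st.2.2
  let mapping := if p.1 ≠ '-' ∧ p.2 ≠ '-' then st.1.insert modomics_pos gtRNAdb_pos else st.1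
  (mapping, modomics_pos, gtRNAdb_pos)

def create_position_mapping (aligned_modomics : String) (aligned_gtRNAdb : String) : List (Int × Int) :=
  (((aligned_modomics.toList.zip aligned_gtRNAdb.toList).foldl pvStepA (PySem.Dict.empty, 0, 0)).1).items

-- ===== PORT B =====
-- itertools.accumulate of the 0/1 non-gap flags (running sums)
def pvAccum (flags : List Int) : List Int := (flags.scanl (· + ·) 0).tail

-- the dict comprehension: insert (mc, gc) for each ((m,g),(mc,gc)) with m and g non-gap
def pvStepB (d : PySem.Dict Int Int) (x : (Char × Char) × (Int × Int)) : PySem.Dict Int Int :=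
  if x.1.1 ≠ '-' ∧ x.1.2 ≠ '-' then d.insert x.2.1 x.2.2 else d

def create_position_mapping_alt (aligned_modomics : String) (aligned_gtRNAdb : String) : List (Int × Int) :=
  let pairs := aligned_modomics.toList.zip aligned_gtRNAdb.toList
  let mod_counts := pvAccum (pairs.map (fun p => if p.1 ≠ '-' then (1 : Int) else 0))
  let gtr_counts := pvAccum (pairs.map (fun p => if p.2 ≠ '-' then (1 : Int) else 0))
  ((pairs.zip (mod_counts.zip gtr_counts)).foldl pvStepB PySem.Dict.empty).items

-- ===== PRECONDITION & SPEC =====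
def Spec_create_position_mapping (aligned_modomics : String) (aligned_gtRNAdb : String) (out : List (Int × Int)) : Prop := out = create_position_mapping_alt aligned_modomics aligned_gtRNAdb
instance (aligned_modomics : String) (aligned_gtRNAdb : String) (out : List (Int × Int)) : Decidable (Spec_create_position_mapping aligned_modomics aligned_gtRNAdb out) := by unfold Spec_create_position_mapping; infer_instance

-- ===== CLAIM (what is proved, stated in full; the proofs are below) =====
def Claim_equal_create_position_mapping : Prop := ∀ (aligned_modomics : String) (aligned_gtRNAdb : String), Dom_create_position_mapping aligned_modomics aligned_gtRNAdb → Spec_create_position_mapping aligned_modomics aligned_gtRNAdb (create_position_mapping aligned_modomics aligned_gtRNAdb)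

-- ===== LEMMAS AND PROOFS =====

-- generalized accumulate: scanl from an arbitrary offset, unfolded one step
lemma pvAccum_offset_cons (a : Int) (xs : List Int) (c : Int) :
    ((a :: xs).scanl (· + ·) c).tail = (c + a) :: ((xs.scanl (· + ·) (c + a)).tail) := by
  cases xs <;> simp [List.scanl]

-- core invariant: A's fold from state (d, mp, gp) builds the same dict as B's fold over the
-- pairs zipped with the running counts offset by mp and gp
lemma pv_core (ps : List (Char × Char)) (d : PySem.Dict Int Int) (mp gp : Int) :
    (ps.foldl pvStepA (d, mp, gp)).1 =
      (ps.zip ((((ps.map (fun p => if p.1 ≠ '-' then (1 : Int) else 0)).scanl (· + ·) mp).tail).zip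
               (((ps.map (fun p => if p.2 ≠ '-' then (1 : Int) else 0)).scanl (· + ·) gp).tail))).foldl
        pvStepB d := by
  induction ps generalizing d mp gp with
  | nil => simp
  | cons p ps ih =>
    simp only [List.map_cons, pvAccum_offset_cons, List.zip_cons_cons, List.foldl_cons]
    rw [ih]
    unfold pvStepA pvStepB
    by_cases h1 : p.1 = '-' <;> by_cases h2 : p.2 = '-' <;> simp [h1, h2]

-- ===== VERDICT (by name: the statement is the Claim_ definition above) =====
theorem create_position_mapping_spec : Claim_equal_create_position_mapping := by
  intro am ag _
  unfold Spec_create_position_mapping create_position_mapping create_position_mapping_alt pvAccum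
  rw [pv_core]
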